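-- pv_equiv track=rewrite | github.com/mass-0910/wordle-solver | main.py | popular
-- ===== SOURCE A (Python) =====
-- def has_same_alphabet(word: str) -> bool:
--     for i in range(len(word)):
--         if word.count(word[i]) > 1:
--             return True
--     return False
--
-- def popular(word: str) -> int:
--     popular_1_alphabets = ['e', 't', 'a', 'o', 'n', 'i', 'r', 's', 'h', 'd', 'l', 'u', 'c', 'm', 'p', 'f', 'y', 'w', 'g', 'b', 'v', 'k', 'x', 'j', 'q', 'z']
--     popular_2_alphabets = ['th', 'he', 'in', 'er', 'an', 're', 'ed', 'on', 'es', 'st', 'en', 'at', 'to', 'nt', 'ha', 'nd', 'ou', 'ea', 'ng', 'as', 'or', 'ti', 'is', 'et', 'it', 'ar', 'te', 'se', 'hi', 'of']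
--     popular_3_alphabets = ['the', 'ing', 'and', 'her', 'ere', 'ent', 'tha', 'nth', 'was', 'eth', 'for', 'dth']
--     popular_point = 0
--     for i, a in enumerate(popular_1_alphabets):
--         if a in word:
--             popular_point += len(popular_1_alphabets) - i
--     for i, a in enumerate(popular_2_alphabets):
--         if a in word:
--             popular_point += len(popular_2_alphabets) - i
--     for i, a in enumerate(popular_3_alphabets):
--         if a in word:
--             popular_point += len(popular_3_alphabets) - i
--     if has_same_alphabet(word):
--         popular_point -= 20
--     return popular_point
-- ===== SOURCE B (Python) =====
-- _POPULAR_LISTS = [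
--     ['e', 't', 'a', 'o', 'n', 'i', 'r', 's', 'h', 'd', 'l', 'u', 'c', 'm', 'p', 'f', 'y', 'w', 'g', 'b', 'v', 'k', 'x', 'j', 'q', 'z'],
--     ['th', 'he', 'in', 'er', 'an', 're', 'ed', 'on', 'es', 'st', 'en', 'at', 'to', 'nt', 'ha', 'nd', 'ou', 'ea', 'ng', 'as', 'or', 'ti', 'is', 'et', 'it', 'ar', 'te', 'se', 'hi', 'of'],
--     ['the', 'ing', 'and', 'her', 'ere', 'ent', 'tha', 'nth', 'was', 'eth', 'for', 'dth'],
-- ]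
--
-- _SCORES = {}
-- for _lst in _POPULAR_LISTS:
--     for _i, _a in enumerate(_lst):
--         _SCORES[_a] = len(_lst) - _i
--
-- def _word_subs(word: str) -> set:
--     subs = set()
--     for k in (1, 2, 3):
--         for i in range(len(word) - k + 1):
--             subs.add(word[i:i + k])
--     return subs
--
-- def popular(word: str) -> int:
--     subs = _word_subs(word)
--     total = sum(_SCORES.get(s, 0) for s in subs)
--     if len(set(word)) < len(word):
--         total -= 20
--     return total
-- ===== Notes on version B (the rewrite author's own statement) =====
-- stated objective: idiomatic
-- what changed: A runs three enumerate loops testing substring membership of each of 68 popular n-grams plus a quadratic count-based duplicate scan; B precomputes one score dict, collects the word's distinct substrings of lengths 1-3 into a set once, sums dict lookups over that set, and tests duplicates via comparing len(set(word)) with len(word).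
import Mathlib
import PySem

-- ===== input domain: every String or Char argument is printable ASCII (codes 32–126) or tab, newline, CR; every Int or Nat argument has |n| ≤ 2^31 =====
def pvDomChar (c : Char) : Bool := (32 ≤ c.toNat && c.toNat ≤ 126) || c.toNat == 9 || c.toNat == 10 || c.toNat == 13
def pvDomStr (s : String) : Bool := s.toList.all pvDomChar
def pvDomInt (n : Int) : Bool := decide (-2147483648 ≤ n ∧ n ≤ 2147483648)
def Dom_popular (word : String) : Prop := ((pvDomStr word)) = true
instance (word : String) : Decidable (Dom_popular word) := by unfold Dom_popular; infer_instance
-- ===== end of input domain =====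

-- B replaces A's three index-scored 'a in word' loops by one precomputed score dict,
-- a set of the word's distinct substrings of lengths 1–3, and a duplicate test via
-- len(set(word)); objective: idiomatic/alternative (same asymptotic cost).

-- ===== PORT A =====
def popular1Alphabets : List String := ["e", "t", "a", "o", "n", "i", "r", "s", "h", "d", "l", "u", "c", "m", "p", "f", "y", "w", "g", "b", "v", "k", "x", "j", "q", "z"]
def popular2Alphabets : List String := ["th", "he", "in", "er", "an", "re", "ed", "on", "es", "st", "en", "at", "to", "nt", "ha", "nd", "ou", "ea", "ng", "as", "or", "ti", "is", "et", "it", "ar", "te", "se", "hi", "of"]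
def popular3Alphabets : List String := ["the", "ing", "and", "her", "ere", "ent", "tha", "nth", "was", "eth", "for", "dth"]

-- 'for i in range(len(word)): if word.count(word[i]) > 1: return True' / 'return False' = .any over the range
def hasSameAlphabet (word : String) : Bool :=
  (PySem.List.pyRange 0 (PySem.Str.len word)).any (fun i =>
    match PySem.Str.pyGet? word i with
    | some c => decide (1 < PySem.Str.count word (String.ofList [c]))
    | none => false)

def popular (word : String) : Int :=
  let p1 := popular1Alphabets
  let p2 := popular2Alphabets
  let p3 := popular3Alphabets
  let pt0 : Int := 0
  let pt1 := (PySem.List.enumerate p1).foldl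
    (fun acc ia => if PySem.Str.isIn ia.2 word then acc + ((p1.length : Int) - ia.1) else acc) pt0
  let pt2 := (PySem.List.enumerate p2).foldl
    (fun acc ia => if PySem.Str.isIn ia.2 word then acc + ((p2.length : Int) - ia.1) else acc) pt1
  let pt3 := (PySem.List.enumerate p3).foldl
    (fun acc ia => if PySem.Str.isIn ia.2 word then acc + ((p3.length : Int) - ia.1) else acc) pt2
  if hasSameAlphabet word then pt3 - 20 else pt3

-- ===== PORT B =====
-- B's strings are handled as their code-point lists (String ↔ List Char bridge)
def popularLists : List (List (List Char)) := [[['e'], ['t'], ['a'], ['o'], ['n'], ['i'], ['r'], ['s'], ['h'], ['d'], ['l'], ['u'], ['c'], ['m'], ['p'], ['f'], ['y'], ['w'], ['g'], ['b'], ['v'], ['k'], ['x'], ['j'], ['q'], ['z']], [['t', 'h'], ['h', 'e'], ['i', 'n'], ['e', 'r'], ['a', 'n'], ['r', 'e'], ['e', 'd'], ['o', 'n'], ['e', 's'], ['s', 't'], ['e', 'n'], ['a', 't'], ['t', 'o'], ['n', 't'], ['h', 'a'], ['n', 'd'], ['o', 'u'], ['e', 'a'], ['n', 'g'], ['a', 's'],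 ['o', 'r'], ['t', 'i'], ['i', 's'], ['e', 't'], ['i', 't'], ['a', 'r'], ['t', 'e'], ['s', 'e'], ['h', 'i'], ['o', 'f']], [['t', 'h', 'e'], ['i', 'n', 'g'], ['a', 'n', 'd'], ['h', 'e', 'r'], ['e', 'r', 'e'], ['e', 'n', 't'], ['t', 'h', 'a'], ['n', 't', 'h'], ['w', 'a', 's'], ['e', 't', 'h'], ['f', 'o', 'r'], ['d', 't', 'h']]]

-- module-level _SCORES dict of Source B
def scoresDict : PySem.Dict (List Char) Int :=
  popularLists.foldl (fun d lst =>
    (PySem.List.enumerate lst).foldl (fun d ia => d.insert ia.2 ((lst.length : Int) - ia.1)) d)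
    PySem.Dict.empty

-- _word_subs of Source B: the distinct substrings of lengths 1..3
def wordSubs (cs : List Char) : PySem.Set (List Char) :=
  ([1, 2, 3] : List Int).foldl (fun s k =>
    (PySem.List.pyRange 0 ((cs.length : Int) - k + 1)).foldl (fun s i =>
      PySem.Set.add s (PySem.List.slice cs (some i) (some (i + k)))) s) PySem.Set.empty

def popular_alt (word : String) : Int :=
  let subs := wordSubs word.toList
  let total : Int := (subs.map (fun sub => scoresDict.getD sub 0)).sum
  if PySem.Set.len (PySem.Set.ofList word.toList) < PySem.Str.len word then total - 20 else total

-- ===== PRECONDITION & SPEC =====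
def Spec_popular (word : String) (out : Int) : Prop := out = popular_alt word
instance (word : String) (out : Int) : Decidable (Spec_popular word out) := by unfold Spec_popular; infer_instance

-- ===== CLAIM (what is proved, stated in full; the proofs are below) =====
def Claim_equal_popular : Prop := ∀ (word : String), Dom_popular word → Spec_popular word (popular word)

-- ===== LEMMAS AND PROOFS =====

-- word.count(c) for a single character is List.count
theorem countGo_single (c : Char) (s : List Char) : ∀ (fuel acc : ℕ), s.length ≤ fuel →
    PySem.Chars.count.go [c] fuel s acc = acc + s.count c := by
  induction s with
  | nil => intro fuel acc _; cases fuel <;> simp [PySem.Chars.count.go]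
  | cons h t ih =>
    intro fuel acc hf
    cases fuel with
    | zero => simp at hf
    | succ f =>
      simp only [PySem.Chars.count.go]
      by_cases hc : c = h
      · subst hc
        simp [List.isPrefixOf, ih f (acc + 1) (by simpa using hf)]
        omega
      · simp [List.isPrefixOf, hc, Ne.symm hc, ih f acc (by simpa using hf)]

theorem count_single (s : List Char) (c : Char) : PySem.Chars.count s [c] = s.count c := by
  have h := countGo_single c s s.length 0 le_rfl
  simpa [PySem.Chars.count] using h

-- A's duplicate test is "word has a repeated character"
theorem hasSame_eq (word : String) :
    hasSameAlphabet word = decide (¬ word.toList.Nodup) := by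
  unfold hasSameAlphabet
  rw [PySem.Str.len_eq, PySem.List.pyRange_zero_natCast]
  rcases Bool.eq_false_or_eq_true (decide (¬ word.toList.Nodup)) with hd | hd <;> rw [hd]
  case inr =>
    simp only [decide_eq_false_iff_not, not_not] at hd
    have hcnt := List.nodup_iff_count_le_one.mp hd
    simp only [List.any_map, List.any_eq_false]
    intro i hi
    simp only [List.mem_range] at hi
    simp only [Function.comp_apply]
    rw [PySem.Str.pyGet?_natCast, List.getElem?_eq_getElem (by exact_mod_cast hi)]
    simp [PySem.Str.count_eq, String.toList_ofList, count_single]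
    exact hcnt _
  case inl =>
    simp only [decide_eq_true_eq] at hd
    rw [List.nodup_iff_count_le_one] at hd
    simp only [not_forall, not_le] at hd
    obtain ⟨c, hc⟩ := hd
    have hmem : c ∈ word.toList := by
      by_contra h
      rw [List.count_eq_zero_of_not_mem h] at hc; omega
    obtain ⟨i, hi, hgi⟩ := List.mem_iff_getElem.mp hmem
    simp only [List.any_map, List.any_eq_true]
    refine ⟨i, by simpa using hi, ?_⟩
    simp only [Function.comp_apply]
    rw [PySem.Str.pyGet?_natCast, List.getElem?_eq_getElem (by exact_mod_cast hi)]
    simp [PySem.Str.count_eq, String.toList_ofList, count_single, hgi]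
    omega

theorem update_eq_append {α : Type} [BEq α] (xs : List α) : ∀ (s : PySem.Set α),
    ∃ t, PySem.Set.update s xs = s ++ t ∧ List.Sublist t xs := by
  induction xs with
  | nil => intro s; exact ⟨[], by simp [PySem.Set.update_eq_foldl], List.Sublist.refl _⟩
  | cons x xs ih =>
    intro s
    rw [PySem.Set.update_cons]
    obtain ⟨t, ht, hsub⟩ := ih (s.add x)
    by_cases hc : PySem.Set.contains s x = true
    · have hadd : s.add x = s := by rw [PySem.Set.add, if_pos hc]
      rw [hadd] at ht ⊢
      exact ⟨t, ht, hsub.cons x⟩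
    · have hadd : s.add x = s ++ [x] := by rw [PySem.Set.add, if_neg hc]
      rw [hadd] at ht ⊢
      exact ⟨x :: t, by simpa using ht, hsub.cons₂ x⟩

theorem ofList_sublist {α : Type} [BEq α] (xs : List α) : List.Sublist (PySem.Set.ofList xs) xs := by
  obtain ⟨t, ht, hsub⟩ := update_eq_append xs PySem.Set.empty
  rw [PySem.Set.ofList.eq_1, ← PySem.Set.update_eq_foldl, ht]
  simpa [PySem.Set.empty] using hsub

-- B's duplicate test: len(set(word)) < len(word) iff word has a repeated character
theorem length_ofList_lt_iff (cs : List Char) :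
    ((PySem.Set.ofList cs).length < cs.length) ↔ ¬ cs.Nodup := by
  constructor
  · intro h hn
    rw [PySem.Set.ofList_eq_self_of_nodup cs hn] at h
    omega
  · intro hn
    rcases Nat.lt_or_ge (PySem.Set.ofList cs).length cs.length with h | h
    · exact h
    · exfalso
      have hle := PySem.Set.length_ofList_le cs
      have heq : PySem.Set.ofList cs = cs := (ofList_sublist cs).eq_of_length (by omega)
      exact hn (heq ▸ PySem.Set.nodup_ofList cs)

-- flattened candidate list behind wordSubs
def subsList (cs : List Char) : List (List Char) :=
  ([1, 2, 3] : List Int).flatMap (fun k =>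
    (PySem.List.pyRange 0 ((cs.length : Int) - k + 1)).map (fun i =>
      PySem.List.slice cs (some i) (some (i + k))))

theorem wordSubs_eq (cs : List Char) : wordSubs cs = PySem.Set.ofList (subsList cs) := by
  unfold wordSubs subsList
  rw [PySem.Set.ofList.eq_1]
  simp only [List.foldl_cons, List.foldl_nil, List.flatMap_cons, List.flatMap_nil,
    List.append_nil, List.foldl_append, List.foldl_map]

theorem mem_wordSubs_iff (cs a : List Char) (h1 : 1 ≤ a.length) (h3 : a.length ≤ 3) :
    a ∈ wordSubs cs ↔ a <:+: cs := by
  rw [wordSubs_eq, PySem.Set.mem_ofList]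
  unfold subsList
  simp only [List.mem_flatMap, List.mem_map]
  constructor
  · rintro ⟨k, hk, i, hi, rfl⟩
    obtain ⟨hi0, _⟩ := PySem.List.mem_pyRange_one.mp hi
    have hk0 : 0 ≤ i + k := by
      simp only [List.mem_cons] at hk
      rcases hk with rfl | rfl | rfl | h <;> first | omega | simp at h
    rw [PySem.List.slice_toNat cs hi0 hk0]
    exact (((cs.drop i.toNat).take_prefix _).isInfix).trans ((cs.drop_suffix i.toNat).isInfix)
  · intro h
    obtain ⟨pre, post, hc⟩ := h
    have hdrop : cs.drop pre.length = a ++ post := by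
      rw [← hc, List.append_assoc, List.drop_left]
    have hlen : pre.length + a.length ≤ cs.length := by
      have := congrArg List.length hc
      simp [List.length_append] at this
      omega
    refine ⟨(a.length : Int), ?_, (pre.length : Int), ?_, ?_⟩
    · have : a.length = 1 ∨ a.length = 2 ∨ a.length = 3 := by omega
      rcases this with h | h | h <;> rw [h] <;> simp
    · refine PySem.List.mem_pyRange_one.mpr ⟨by positivity, ?_⟩
      omega
    · rw [PySem.List.slice_natCast_add, hdrop, List.take_left']
      rfl

-- the score dict as a flat association list
def scorePairs : List (List Char × Int) := [(['e'], 26), (['t'], 25), (['a'], 24), (['o'], 23), (['n'], 22), (['i'], 21), (['r'], 20), (['s'], 19), (['h'], 18), (['d'], 17), (['l'], 16), (['u'], 15), (['c'], 14), (['m'], 13), (['p'], 12), (['f'], 11), (['y'], 10), (['w'], 9), (['g'], 8), (['b'], 7), (['v'], 6), (['k'], 5), (['x'], 4), (['j'], 3), (['q'], 2), (['z'], 1), (['t', 'h'], 30), (['h', 'e'], 29), (['i', 'n'], 28), (['e', 'r'], 27), (['a', 'n'], 26), (['r', 'e'], 25), (['e', 'd'], 24), (['o', 'n'], 23), (['e',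 's'], 22), (['s', 't'], 21), (['e', 'n'], 20), (['a', 't'], 19), (['t', 'o'], 18), (['n', 't'], 17), (['h', 'a'], 16), (['n', 'd'], 15), (['o', 'u'], 14), (['e', 'a'], 13), (['n', 'g'], 12), (['a', 's'], 11), (['o', 'r'], 10), (['t', 'i'], 9), (['i', 's'], 8), (['e', 't'], 7), (['i', 't'], 6), (['a', 'r'], 5), (['t', 'e'], 4), (['s', 'e'], 3), (['h', 'i'], 2), (['o', 'f'], 1), (['t', 'h', 'e'], 12), (['i', 'n', 'g'], 11), (['a', 'n', 'd'], 10), (['h', 'e', 'r'], 9), (['e', 'r', 'e'], 8), (['e', 'n', 't'], 7), (['t', 'h', 'a'], 6), (['n', 't', 'h'], 5), (['w', 'a', 's'], 4), (['e', 't', 'h'], 3), (['f', 'o', 'r'], 2), (['d', 't', 'h'], 1)]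

set_option maxRecDepth 100000 in
theorem scoresDict_items : scoresDict.items = scorePairs := by decide

-- summing a nodup-keyed dict's default-0 lookups over a nodup list
theorem sum_ite_key (k : List Char) (v : Int) (g : List Char → Int) (hg : g k = 0) :
    ∀ S : List (List Char), S.Nodup →
      (S.map (fun s => if k = s then v else g s)).sum = (if k ∈ S then v else 0) + (S.map g).sum := by
  intro S
  induction S with
  | nil => simp
  | cons s S ih =>
    intro hS
    obtain ⟨hns, hS'⟩ := List.nodup_cons.mp hS
    simp only [List.map_cons, List.sum_cons, List.mem_cons]
    by_cases hks : k = s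
    · subst hks
      rw [if_pos rfl, if_pos (Or.inl rfl), hg]
      have : S.map (fun s => if k = s then v else g s) = S.map g := by
        apply List.map_congr_left
        intro x hx
        rw [if_neg (by rintro rfl; exact hns hx)]
      rw [this]
      ring
    · rw [if_neg hks, ih hS']
      rw [if_congr (or_iff_right hks) rfl rfl]
      ring

theorem sum_getD_list (l : List (List Char × Int)) (hl : (l.map Prod.fst).Nodup) :
    ∀ (S : List (List Char)), S.Nodup →
      (S.map (fun s => (PySem.Dict.mk l).getD s 0)).sum
        = (l.map (fun p => if p.1 ∈ S then p.2 else 0)).sum := by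
  induction l with
  | nil =>
    intro S _
    simp [PySem.Dict.getD, PySem.Dict.get?]
  | cons p l ih =>
    intro S hS
    simp only [List.map_cons, List.nodup_cons] at hl
    obtain ⟨hnin, hl'⟩ := hl
    have hstep : ∀ s, (PySem.Dict.mk (p :: l)).getD s 0
        = if p.1 = s then p.2 else (PySem.Dict.mk l).getD s 0 := by
      intro s
      by_cases h : p.1 = s
      · rw [if_pos h]
        simp only [PySem.Dict.getD, PySem.Dict.get?]
        rw [List.find?_cons_of_pos (by simp [h])]
        rfl
      · rw [if_neg h]
        simp only [PySem.Dict.getD, PySem.Dict.get?]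
        rw [List.find?_cons_of_neg (by simp [h])]
    have hzero : (PySem.Dict.mk l).getD p.1 0 = 0 := by
      simp only [PySem.Dict.getD, PySem.Dict.get?]
      rw [List.find?_eq_none.mpr ?_]
      · rfl
      · intro q hq hbeq
        exact hnin (by
          have : q.1 = p.1 := by simpa using hbeq
          exact this ▸ List.mem_map_of_mem hq)
    simp only [hstep]
    rw [sum_ite_key p.1 p.2 _ hzero S hS, ih hl' S hS, List.map_cons, List.sum_cons]

theorem sum_getD (d : PySem.Dict (List Char) Int) (hl : (d.items.map Prod.fst).Nodup)
    (S : List (List Char)) (hS : S.Nodup) :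
    (S.map (fun s => d.getD s 0)).sum = (d.items.map (fun p => if p.1 ∈ S then p.2 else 0)).sum := by
  cases d with
  | mk l => exact sum_getD_list l hl S hS

-- A's membership loops: each adds its scores once, as a sum over the enumerated list
theorem foldl_pop (word : String) (L : List String) (a : Int) :
    (PySem.List.enumerate L).foldl
      (fun acc ia => if PySem.Str.isIn ia.2 word then acc + ((L.length : Int) - ia.1) else acc) a
    = a + ((PySem.List.enumerate L).map
        (fun ia => if ia.2.toList <:+: word.toList then (L.length : Int) - ia.1 else 0)).sum := by
  have hfun : ∀ (acc : Int) (ia : Int × String), ia ∈ PySem.List.enumerate L →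
      (if PySem.Str.isIn ia.2 word then acc + ((L.length : Int) - ia.1) else acc)
        = acc + (if ia.2.toList <:+: word.toList then (L.length : Int) - ia.1 else 0) := by
    intro acc ia _
    by_cases h : ia.2.toList <:+: word.toList
    · rw [if_pos ((PySem.Str.isIn_iff_infix _ _).mpr h), if_pos h]
    · rw [if_neg (fun hh => h ((PySem.Str.isIn_iff_infix _ _).mp hh)), if_neg h, add_zero]
  refine Eq.trans (PySem.List.foldl_congr_mem _ _ _ _ hfun) (PySem.List.foldl_add _ _ _)

set_option maxRecDepth 100000 in
theorem scorePairs_split :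
    ((PySem.List.enumerate popular1Alphabets).map
        (fun ia => (ia.2.toList, (popular1Alphabets.length : Int) - ia.1)))
      ++ ((PySem.List.enumerate popular2Alphabets).map
        (fun ia => (ia.2.toList, (popular2Alphabets.length : Int) - ia.1)))
      ++ ((PySem.List.enumerate popular3Alphabets).map
        (fun ia => (ia.2.toList, (popular3Alphabets.length : Int) - ia.1)))
      = scorePairs := by rfl

set_option maxRecDepth 100000 in
theorem scorePairs_lengths : ∀ p ∈ scorePairs, 1 ≤ p.1.length ∧ p.1.length ≤ 3 := by decide

theorem popular_eq (word : String) : popular word = popular_alt word := by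
  have hkeys' : (scoresDict.items.map Prod.fst).Nodup := by
    rw [scoresDict_items]; decide
  have hnodupS : (wordSubs word.toList).Nodup := by
    rw [wordSubs_eq]; exact PySem.Set.nodup_ofList _
  have hB : ((wordSubs word.toList).map (fun sub => scoresDict.getD sub 0)).sum
      = (scorePairs.map (fun p => if p.1 <:+: word.toList then p.2 else 0)).sum := by
    rw [sum_getD scoresDict hkeys' (wordSubs word.toList) hnodupS, scoresDict_items]
    refine congrArg List.sum ?_
    apply List.map_congr_left
    intro p hp
    exact if_congr (mem_wordSubs_iff word.toList p.1 (scorePairs_lengths p hp).1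
      (scorePairs_lengths p hp).2) rfl rfl
  have hpen : (PySem.Set.len (PySem.Set.ofList word.toList) < PySem.Str.len word)
      ↔ ¬ word.toList.Nodup := by
    rw [PySem.Str.len_eq]
    simp only [PySem.Set.len]
    rw [Nat.cast_lt]
    exact length_ofList_lt_iff word.toList
  simp only [popular, popular_alt, foldl_pop, zero_add, hB, hasSame_eq]
  rw [← scorePairs_split]
  simp only [List.map_append, List.sum_append, List.map_map, Function.comp_def]
  by_cases hdup : word.toList.Nodup
  · rw [if_neg (by simp [hdup]), if_neg (fun h => (hpen.mp h) hdup)]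
  · rw [if_pos (by simp [hdup]), if_pos (hpen.mpr hdup)]

-- ===== VERDICT (by name: the statement is the Claim_ definition above) =====
theorem popular_spec : Claim_equal_popular := by
  intro word _
  unfold Spec_popular
  exact popular_eq word
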